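-- pv_equiv track=rewrite | github.com/alamansari11/Notes | dsa/5_array/extra/temp.py | count
-- ===== SOURCE A (Python) =====
-- def count(N):
--     cnt = 0
--     for i in range(1, N + 1):
--         bin_str = bin(i)[2:]
--         transformed = bin_str.replace('1', '2').replace('0', '1')
--         total_sum = sum(int(char) for char in transformed)
--         if total_sum % 2 != 0:
--             cnt += 1
--     return cnt
-- ===== SOURCE B (Python) =====
-- def _pair(m):
--     # (fg(m), fg(m-1)) for m >= 1, where fg(n) = (#i in [1,n] with an odd
--     # number of '0' bits in bin(i), #i in [1,n] with an even number).
--     if m == 1: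
--         return ((0, 1), (0, 0))
--     p, q = _pair(m // 2)
--     if m % 2 == 0:
--         fm = (p[1] + q[0], p[0] + q[1] + 1)
--         fm1 = (q[1] + q[0], q[0] + q[1] + 1)
--     else:
--         fm = (p[1] + p[0], p[0] + p[1] + 1)
--         fm1 = (p[1] + q[0], p[0] + q[1] + 1)
--     return (fm, fm1)
--
-- def count(N):
--     if N <= 0:
--         return 0
--     return _pair(N)[0][0]
-- ===== Notes on version B (the rewrite author's own statement) =====
-- stated objective: faster
-- what changed: A loops over every i in [1,N], builds bin(i) as a string, rewrites it and sums digits to test parity; B observes that the test is 'odd number of 0-bits' and computes the count by a single O(log N) recursion on N that returns the pair (count for n, count for n-1) of (odd,even) zero-bit counts, halving n at each step.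
import Mathlib
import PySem

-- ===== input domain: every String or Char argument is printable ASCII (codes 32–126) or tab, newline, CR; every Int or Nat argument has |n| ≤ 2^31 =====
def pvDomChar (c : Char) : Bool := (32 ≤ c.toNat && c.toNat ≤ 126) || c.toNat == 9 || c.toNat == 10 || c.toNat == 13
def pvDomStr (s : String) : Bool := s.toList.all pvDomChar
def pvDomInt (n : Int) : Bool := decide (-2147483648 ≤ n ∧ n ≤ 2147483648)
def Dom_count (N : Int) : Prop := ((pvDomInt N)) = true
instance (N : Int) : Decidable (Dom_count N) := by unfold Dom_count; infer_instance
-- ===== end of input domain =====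

-- B replaces A's per-number string scan by an O(log N) pair recursion on N; objective: faster (asymptotic).

-- ===== PORT A =====
def count (N : Int) : Int :=
  (PySem.List.pyRange 1 (N + 1) 1).foldl (fun cnt i =>
    let bin_str := PySem.Str.slice (PySem.Int.pyBin i) (some 2) none
    let transformed := PySem.Str.replace (PySem.Str.replace bin_str "1" "2") "0" "1"
    -- int(char): the chars are always '1'/'2' here, so int() never raises; getD 0 is exact
    let total_sum := (transformed.toList.map (fun c => (PySem.Int.ofStr? (String.mk [c])).getD 0)).sum
    if PySem.Int.mod total_sum 2 ≠ 0 then cnt + 1 else cnt) 0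

-- ===== PORT B =====
-- _pair m = (fg m, fg (m-1)) for m ≥ 1, fg n = (#i∈[1,n] with odd #0-bits, #i∈[1,n] with even #0-bits)
def pairB (m : Nat) : (Int × Int) × (Int × Int) :=
  if m ≤ 1 then ((0, 1), (0, 0))
  else
    let pq := pairB (m / 2)
    let p := pq.1
    let q := pq.2
    if m % 2 = 0 then
      ((p.2 + q.1, p.1 + q.2 + 1), (q.2 + q.1, q.1 + q.2 + 1))
    else
      ((p.2 + p.1, p.1 + p.2 + 1), (p.2 + q.1, p.1 + q.2 + 1))
termination_by m
decreasing_by exact Nat.div_lt_self (by omega) (by omega)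

def count_alt (N : Int) : Int :=
  if N ≤ 0 then 0 else ((pairB N.toNat).1).1

-- ===== PRECONDITION & SPEC =====
def Spec_count (N : Int) (out : Int) : Prop := out = count_alt N
instance (N : Int) (out : Int) : Decidable (Spec_count N out) := by unfold Spec_count; infer_instance

-- ===== CLAIM (what is proved, stated in full; the proofs are below) =====
def Claim_equal_count : Prop := ∀ (N : Int), Dom_count N → Spec_count N (count N)

-- ===== LEMMAS AND PROOFS =====

-- reference predicate: odd number of '0' bits in the binary representation
def zodd (n : Nat) : Bool :=
  if n < 2 then false else xor (zodd (n / 2)) (n % 2 == 0)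
termination_by n
decreasing_by exact Nat.div_lt_self (by omega) (by omega)

-- binary digits of n (as Nat.toDigits 2 produces them)
def binC (n : Nat) : List Char :=
  if n < 2 then [Nat.digitChar n] else binC (n / 2) ++ [Nat.digitChar (n % 2)]
termination_by n
decreasing_by exact Nat.div_lt_self (by omega) (by omega)

def FN (m : Nat) : Nat := (List.range m).countP (fun j => zodd (j + 1))
def GN (m : Nat) : Nat := (List.range m).countP (fun j => !zodd (j + 1))

def svalC (n : Nat) : Int := ((binC n).map (fun c => if c = '0' then (1 : Int) else 2)).sum

theorem binC_lt {n : Nat} (h : n < 2) : binC n = [Nat.digitChar n] := by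
  rw [binC, if_pos h]

theorem binC_ge {n : Nat} (h : ¬ n < 2) : binC n = binC (n / 2) ++ [Nat.digitChar (n % 2)] := by
  rw [binC, if_neg h]

theorem zodd_lt {n : Nat} (h : n < 2) : zodd n = false := by
  rw [zodd, if_pos h]

theorem zodd_ge {n : Nat} (h : ¬ n < 2) : zodd n = xor (zodd (n / 2)) (n % 2 == 0) := by
  rw [zodd, if_neg h]

theorem toDigitsCore_eq_binC (f : Nat) : ∀ (n : Nat) (acc : List Char), n < f →
    Nat.toDigitsCore 2 f n acc = binC n ++ acc := by
  induction f with
  | zero => intro n acc h; omega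
  | succ f ih =>
    intro n acc h
    by_cases h2 : n / 2 = 0
    · have hn2 : n < 2 := by omega
      simp only [Nat.toDigitsCore, h2, if_pos]
      rw [binC_lt hn2]
      have : n % 2 = n := Nat.mod_eq_of_lt hn2
      simp [this]
    · have hn2 : ¬ n < 2 := by omega
      simp only [Nat.toDigitsCore, h2]
      rw [ih (n / 2) _ (by omega)]
      rw [binC_ge hn2]
      simp

theorem toDigits_eq_binC (n : Nat) : Nat.toDigits 2 n = binC n := by
  have := toDigitsCore_eq_binC (n + 1) n [] (by omega)
  simpa [Nat.toDigits] using this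

theorem replace_go_single (o n : Char) : ∀ (fuel : Nat) (l acc : List Char), l.length ≤ fuel →
    PySem.Chars.replace.go [o] [n] fuel l acc
      = acc.reverse ++ l.map (fun c => if c = o then n else c) := by
  intro fuel
  induction fuel with
  | zero =>
    intro l acc h
    have : l = [] := by cases l <;> simp_all
    subst this; simp [PySem.Chars.replace.go]
  | succ f ih =>
    intro l acc h
    cases l with
    | nil => simp [PySem.Chars.replace.go]
    | cons c t =>
      have ht : t.length ≤ f := by simpa using h
      by_cases hc : o = c
      · subst hc
        have hpre : List.isPrefixOf [o] (o :: t) = true := by simp [List.isPrefixOf]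
        simp only [PySem.Chars.replace.go, hpre, if_pos]
        rw [show List.drop [o].length (o :: t) = t from rfl,
            show ([n].reverse ++ acc) = n :: acc from rfl]
        rw [ih t (n :: acc) ht]
        simp
      · have hcc : ¬ c = o := fun h' => hc h'.symm
        have hpre : List.isPrefixOf [o] (c :: t) = false := by
          simp [List.isPrefixOf, hc]
        simp only [PySem.Chars.replace.go, hpre]
        rw [ih t (c :: acc) ht]
        simp [hcc]

theorem replace_single (cs : List Char) (o n : Char) :
    PySem.Chars.replace cs [o] [n] = cs.map (fun c => if c = o then n else c) := by
  rw [PySem.Chars.replace]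
  rw [if_neg (by simp : ¬ (([o] : List Char).isEmpty = true))]
  exact replace_go_single o n cs.length cs [] (le_refl _)

theorem binC_mem (n : Nat) : ∀ c ∈ binC n, c = '0' ∨ c = '1' := by
  induction n using Nat.strong_induction_on with
  | _ n ih =>
    intro c hc
    by_cases h : n < 2
    · rw [binC_lt h] at hc
      interval_cases n <;> simp_all [Nat.digitChar] <;> simp_all
    · rw [binC_ge h] at hc
      rcases List.mem_append.mp hc with h1 | h2
      · exact ih (n / 2) (Nat.div_lt_self (by omega) (by omega)) c h1
      · have h01 : n % 2 = 0 ∨ n % 2 = 1 := by omega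
        rcases h01 with h0 | h1'
        · left; simp_all [Nat.digitChar]
        · right; simp_all [Nat.digitChar]

theorem zodd_two_mul (y : Nat) (hy : 1 ≤ y) : zodd (2 * y) = !zodd y := by
  rw [zodd_ge (by omega)]
  simp [Nat.mul_div_cancel_left, Nat.mul_mod_right, Bool.xor_true]

theorem zodd_two_mul_add_one (y : Nat) (hy : 1 ≤ y) : zodd (2 * y + 1) = zodd y := by
  rw [zodd_ge (by omega)]
  have h1 : (2 * y + 1) / 2 = y := by omega
  have h2 : (2 * y + 1) % 2 = 1 := by omega
  simp [h1, h2]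

theorem svalC_parity : ∀ (m : Nat), 1 ≤ m → svalC m % 2 = if zodd m then 1 else 0 := by
  intro m
  induction m using Nat.strong_induction_on with
  | _ m ih =>
    intro hm
    by_cases h : m < 2
    · have : m = 1 := by omega
      subst this
      rw [svalC, binC_lt (by omega), zodd_lt (by omega)]
      decide
    · rw [svalC, binC_ge h, zodd_ge h]
      have hrec := ih (m / 2) (Nat.div_lt_self (by omega) (by omega)) (by omega)
      rw [svalC] at hrec
      have h01 : m % 2 = 0 ∨ m % 2 = 1 := by omega
      rcases h01 with h0 | h1
      · simp only [h0, Nat.digitChar]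
        norm_num [List.map_append]
        cases hz : zodd (m / 2) <;> simp [hz] at hrec ⊢ <;> omega
      · simp only [h1, Nat.digitChar]
        norm_num [List.map_append]
        cases hz : zodd (m / 2) <;> simp [hz] at hrec ⊢ <;> omega

-- the per-iteration total of A's loop equals svalC
theorem total_eq (i : Int) (hi : 1 ≤ i) :
    ((PySem.Str.replace (PySem.Str.replace
        (PySem.Str.slice (PySem.Int.pyBin i) (some 2) none) "1" "2") "0" "1").toList.map
      (fun c => (PySem.Int.ofStr? (String.mk [c])).getD 0)).sum = svalC i.toNat := by
  have hbin : (PySem.Str.slice (PySem.Int.pyBin i) (some 2) none).toList = binC i.toNat := by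
    rw [PySem.Str.toList_slice]
    rw [PySem.Int.toList_pyBin]
    rw [PySem.Int.toBinChars0b]
    rw [if_neg (by omega)]
    simp [PySem.Chars.slice_eq_listSlice, PySem.List.slice_from, toDigits_eq_binC]
  rw [PySem.Str.toList_replace, PySem.Str.toList_replace, hbin]
  have h1 : ("1" : String).toList = ['1'] := rfl
  have h2 : ("2" : String).toList = ['2'] := rfl
  have h0 : ("0" : String).toList = ['0'] := rfl
  rw [h1, h2, h0, replace_single, replace_single, List.map_map, List.map_map]
  rw [svalC]
  apply congrArg
  apply List.map_congr_left
  intro c hc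
  rcases binC_mem i.toNat c hc with h | h <;> subst h <;> decide

theorem FN_succ (m : Nat) : FN (m + 1) = FN m + (if zodd (m + 1) then 1 else 0) := by
  by_cases h : zodd (m + 1) <;>
    simp [FN, List.range_succ, List.countP_append, List.countP_cons, h]

theorem GN_succ (m : Nat) : GN (m + 1) = GN m + (if zodd (m + 1) then 0 else 1) := by
  by_cases h : zodd (m + 1) <;>
    simp [GN, List.range_succ, List.countP_append, List.countP_cons, h]

theorem FN_zero : FN 0 = 0 := by simp [FN]
theorem GN_zero : GN 0 = 0 := by simp [GN]
theorem zodd_one : zodd 1 = false := zodd_lt (by omega)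

-- the halving recurrences for FN / GN
theorem FG_rec : ∀ (m : Nat), 1 ≤ m →
    FN m = GN (m / 2) + FN ((m - 1) / 2) ∧ GN m = FN (m / 2) + GN ((m - 1) / 2) + 1 := by
  intro m
  induction m with
  | zero => omega
  | succ m ih =>
    intro _
    by_cases hm : m = 0
    · subst hm
      refine ⟨?_, ?_⟩ <;> simp [FN_succ, GN_succ, FN_zero, GN_zero, zodd_one]
    · have hm1 : 1 ≤ m := by omega
      obtain ⟨hF, hG⟩ := ih hm1
      by_cases he : (m + 1) % 2 = 0
      · -- m + 1 = 2 * y, y ≥ 1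
        obtain ⟨y, hy⟩ : ∃ y, m + 1 = 2 * y := ⟨(m + 1) / 2, by omega⟩
        have hy1 : 1 ≤ y := by omega
        have e1 : (m + 1) / 2 = y := by omega
        have e2 : m / 2 = y - 1 := by omega
        have e3 : (m - 1) / 2 = y - 1 := by omega
        have hz : zodd (m + 1) = !zodd y := by rw [hy]; exact zodd_two_mul y hy1
        obtain ⟨z, hzdef⟩ : ∃ z, y = z + 1 := ⟨y - 1, by omega⟩
        have hGy : GN y = GN (y - 1) + (if zodd y then 0 else 1) := by
          rw [hzdef]; simpa using GN_succ z
        have hFy : FN y = FN (y - 1) + (if zodd y then 1 else 0) := by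
          rw [hzdef]; simpa using FN_succ z
        have e1' : (m + 1) / 2 = y := e1
        have e2' : (m + 1 - 1) / 2 = y - 1 := by omega
        rw [e2, e3] at hF hG
        constructor
        · rw [FN_succ, e1', e2', hF, hz, hGy]
          cases zodd y <;> simp <;> omega
        · rw [GN_succ, e1', e2', hG, hz, hFy]
          cases zodd y <;> simp <;> omega
      · -- m + 1 = 2 * y + 1, y ≥ 1
        obtain ⟨y, hy⟩ : ∃ y, m + 1 = 2 * y + 1 := ⟨m / 2, by omega⟩
        have hy1 : 1 ≤ y := by omega
        have e1 : (m + 1) / 2 = y := by omega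
        have e2 : m / 2 = y := by omega
        have e3 : (m - 1) / 2 = y - 1 := by omega
        have hz : zodd (m + 1) = zodd y := by rw [hy]; exact zodd_two_mul_add_one y hy1
        obtain ⟨z, hzdef⟩ : ∃ z, y = z + 1 := ⟨y - 1, by omega⟩
        have hGy : GN y = GN (y - 1) + (if zodd y then 0 else 1) := by
          rw [hzdef]; simpa using GN_succ z
        have hFy : FN y = FN (y - 1) + (if zodd y then 1 else 0) := by
          rw [hzdef]; simpa using FN_succ z
        have e1' : (m + 1) / 2 = y := e1
        have e2' : (m + 1 - 1) / 2 = y := by omega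
        rw [e2, e3] at hF hG
        constructor
        · rw [FN_succ, e1', e2', hF, hz, hFy]
          cases zodd y <;> simp <;> omega
        · rw [GN_succ, e1', e2', hG, hz, hGy]
          cases zodd y <;> simp <;> omega

theorem pairB_eq : ∀ (m : Nat), 1 ≤ m →
    pairB m = (((FN m : Int), (GN m : Int)), ((FN (m - 1) : Int), (GN (m - 1) : Int))) := by
  intro m
  induction m using Nat.strong_induction_on with
  | _ m ih =>
    intro hm
    by_cases h1 : m ≤ 1
    · have : m = 1 := by omega
      subst this
      have hF1 : FN 1 = 0 := by have := FN_succ 0; simp [FN_zero, zodd_one] at this; exact this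
      have hG1 : GN 1 = 1 := by have := GN_succ 0; simp [GN_zero, zodd_one] at this; exact this
      rw [pairB]
      simp [hF1, hG1, FN_zero, GN_zero]
    · rw [pairB, if_neg h1]
      have hrec := ih (m / 2) (Nat.div_lt_self (by omega) (by omega)) (by omega)
      obtain ⟨hFm, hGm⟩ := FG_rec m (by omega)
      obtain ⟨hFm1, hGm1⟩ := FG_rec (m - 1) (by omega)
      by_cases he : m % 2 = 0
      · have e2 : (m - 1) / 2 = m / 2 - 1 := by omega
        have e3 : (m - 1 - 1) / 2 = m / 2 - 1 := by omega
        rw [e2] at hFm hGm hFm1 hGm1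
        rw [e3] at hFm1 hGm1
        simp only [hrec, he, if_pos]
        rw [hFm, hGm, hFm1, hGm1]
        simp only [Prod.mk.injEq]
        push_cast
        omega
      · have e2 : (m - 1) / 2 = m / 2 := by omega
        have e3 : (m - 1 - 1) / 2 = m / 2 - 1 := by omega
        rw [e2] at hFm hGm hFm1 hGm1
        rw [e3] at hFm1 hGm1
        simp only [hrec, if_neg he]
        rw [hFm, hGm, hFm1, hGm1]
        simp only [Prod.mk.injEq]
        push_cast
        omega

theorem count_natCast (k : Nat) : count ((k : Nat) : Int) = (FN k : Int) := by
  induction k with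
  | zero =>
    unfold count
    rw [PySem.List.pyRange_one_eq_nil (by norm_num)]
    simp [FN_zero]
  | succ k ih =>
    unfold count at ih ⊢
    have hcast : ((k + 1 : Nat) : Int) + 1 = ((k : Int) + 1) + 1 := by push_cast; ring
    rw [hcast, PySem.List.pyRange_one_succ_right (by omega : (1:Int) ≤ (k : Int) + 1)]
    rw [List.foldl_append, ih]
    simp only [List.foldl_cons, List.foldl_nil]
    have htn : ((k : Int) + 1).toNat = k + 1 := by omega
    rw [total_eq ((k : Int) + 1) (by omega), htn]
    rw [PySem.Int.mod_eq_emod_of_pos (by omega : (0:Int) < 2)]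
    rw [svalC_parity (k + 1) (by omega)]
    rw [FN_succ]
    cases hz : zodd (k + 1) <;> simp

-- ===== VERDICT (by name: the statement is the Claim_ definition above) =====
theorem count_spec : Claim_equal_count := by
  unfold Claim_equal_count
  intro N _
  unfold Spec_count
  by_cases hN : N ≤ 0
  · unfold count count_alt
    rw [PySem.List.pyRange_one_eq_nil (by omega)]
    simp [hN]
  · have hk : N = ((N.toNat : Nat) : Int) := by omega
    rw [hk, count_natCast]
    unfold count_alt
    rw [if_neg (by omega)]
    have h1 : (((N.toNat : Nat) : Int)).toNat = N.toNat := by omega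
    rw [h1, pairB_eq N.toNat (by omega)]
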